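-- pv_equiv track=rewrite | github.com/meowmeowxw/gpu-tlb | examples/a30/eviction_sets.py | get_eviction_set
-- ===== SOURCE A (Python) =====
-- xored = [
--     [44, 36, 28, 20],
--     [45, 37, 29, 21],
--     [46, 38, 30, 22],
--     [39, 31, 23],
--     [40, 32, 24],
--     [41, 33, 25],
--     [42, 34, 26],
--     [43, 35, 27],
-- ]
--
-- def get_virtual_address(address):
--     cache_set = [0 for _ in range(len(xored))]
--     for i, values in enumerate(xored):
--         for v in values:
--             mask = 1 << v
--             cache_set[i] ^= ((address & mask) >> v)
--
--     return int("".join(map(str, cache_set)), 2)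
--
-- def get_eviction_set(cache_set, base_address=0x700000000000, indexed=True, n=9):
--     start_addr = base_address
--     addresses = []
--     while len(addresses) < n:
--         start_addr += 0x100000
--         if get_virtual_address(start_addr) == cache_set:
--             addresses.append(start_addr)
--     if indexed:
--         results = []
--         for addr in addresses:
--             results.append((base_address ^ addr) >> 20)
--         return results
--     return addresses
-- ===== SOURCE B (Python) =====
-- # B: instead of stepping through every 0x100000 increment and re-hashing 27 bits
-- # each time, solve the GF(2) hash directly: bits 20..27 of the address map
-- # bijectively (bit-reversal) onto the cache-set value, so each aligned block of
-- # 256 steps contains exactly one matching address, computed in closed form from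
-- # the block's high-bit hash.
--
-- _HIGH = [[v for v in row if v >= 28] for row in [
--     [44, 36, 28, 20],
--     [45, 37, 29, 21],
--     [46, 38, 30, 22],
--     [39, 31, 23],
--     [40, 32, 24],
--     [41, 33, 25],
--     [42, 34, 26],
--     [43, 35, 27],
-- ]]
--
-- def _bitrev8(x):
--     r = 0
--     for i in range(8):
--         r = (r << 1) | ((x >> i) & 1)
--     return r
--
-- def _block_hash(block):
--     # hash contribution of address bits >= 28, for addresses with addr>>28 == block
--     h = 0
--     for row in _HIGH:
--         b = 0
--         for v in row:
--             b ^= (block >> (v - 28)) & 1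
--         h = (h << 1) | b
--     return h
--
-- def get_eviction_set(cache_set, base_address=0x700000000000, indexed=True, n=9):
--     low20 = base_address & 0xfffff
--     first = (base_address >> 20) + 1      # smallest candidate address, >> 20
--     ts = []
--     block = first >> 8
--     while len(ts) < n:
--         t = (block << 8) | _bitrev8(cache_set ^ _block_hash(block))
--         if t >= first:
--             ts.append(t)
--         block += 1
--     if indexed:
--         return [(base_address >> 20) ^ t for t in ts]
--     return [(t << 20) + low20 for t in ts]
-- ===== Notes on version B (the rewrite author's own statement) =====
-- stated objective: faster
-- what changed: Instead of stepping through every 0x100000 increment and re-hashing all 27 address bits per step, B solves the GF(2) hash in closed form: bits 20..27 map bijectively (bit reversal) onto the cache-set value, so B jumps block-by-block of 256 steps and computes the unique matching address of each block directly.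
import Mathlib
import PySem

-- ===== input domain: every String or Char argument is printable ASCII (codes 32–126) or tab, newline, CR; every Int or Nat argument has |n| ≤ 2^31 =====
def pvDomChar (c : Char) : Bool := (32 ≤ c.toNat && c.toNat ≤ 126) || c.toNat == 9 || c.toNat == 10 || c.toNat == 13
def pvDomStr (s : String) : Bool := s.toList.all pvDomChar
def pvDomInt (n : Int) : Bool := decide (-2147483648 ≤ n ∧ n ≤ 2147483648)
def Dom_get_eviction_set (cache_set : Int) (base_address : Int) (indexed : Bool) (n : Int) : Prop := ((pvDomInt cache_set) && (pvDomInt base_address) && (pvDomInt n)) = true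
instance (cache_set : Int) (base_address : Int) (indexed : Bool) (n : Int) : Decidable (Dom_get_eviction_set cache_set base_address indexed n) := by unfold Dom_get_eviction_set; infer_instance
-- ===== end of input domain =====

-- B replaces A's step-by-step scan (256 hash evaluations of 27 bits per hit) by solving the
-- GF(2) hash in closed form per 256-step block; measured much faster for large n.

-- ===== PORT A =====
def pvXored : List (List Nat) :=
  [[44, 36, 28, 20], [45, 37, 29, 21], [46, 38, 30, 22], [39, 31, 23],
   [40, 32, 24], [41, 33, 25], [42, 34, 26], [43, 35, 27]]

-- port of A's helper get_virtual_address; int("".join(map(str, cache_set)), 2) is ported as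
-- the base-2 digit fold, exact here because every entry of cache_set is the int 0 or 1,
-- printed as '0'/'1'
def get_virtual_address (address : Int) : Int :=
  let cache_set : List Int := (List.range pvXored.length).map (fun _ => 0)
  let cache_set := (PySem.List.enumerate pvXored).foldl (fun cs (iv : Int × List Nat) =>
    iv.2.foldl (fun cs v =>
      let mask : Int := 1 <<< v
      PySem.List.pySetD cs iv.1
        (PySem.Int.bxor (PySem.List.pyGetD cs iv.1 0) ((PySem.Int.band address mask) >>> v))) cs) cache_set
  cache_set.foldl (fun acc d => acc * 2 + d) 0

-- A's while-loop, with fuel (one unit per iteration; under Pre_ the given fuel is enough,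
-- because every aligned block of 256 steps contains a matching address)
def pvLoopA (cache_set : Int) (n : Int) : Nat → Int → List Int → List Int
  | 0, _, addresses => addresses
  | fuel + 1, start_addr, addresses =>
    if (addresses.length : Int) < n then
      let start_addr := start_addr + 0x100000
      let addresses := if get_virtual_address start_addr = cache_set then addresses ++ [start_addr] else addresses
      pvLoopA cache_set n fuel start_addr addresses
    else addresses

def get_eviction_set (cache_set : Int) (base_address : Int) (indexed : Bool) (n : Int) : List Int :=
  let addresses := pvLoopA cache_set n (256 * (n.toNat + 2)) base_address []
  if indexed then
    addresses.foldl (fun results addr => results ++ [(PySem.Int.bxor base_address addr) >>> (20:Nat)]) []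
  else addresses

-- ===== PORT B =====
def pvHigh : List (List Nat) :=
  [[44, 36, 28], [45, 37, 29], [46, 38, 30], [39, 31], [40, 32], [41, 33], [42, 34], [43, 35]]

def pvBitrev8 (x : Int) : Int :=
  (List.range 8).foldl (fun (r : Int) (i : Nat) => PySem.Int.bor (r <<< (1:Nat)) (PySem.Int.band (x >>> i) 1)) 0

def pvBlockHash (block : Int) : Int :=
  pvHigh.foldl (fun (h : Int) (row : List Nat) =>
    PySem.Int.bor (h <<< (1:Nat))
      (row.foldl (fun (b : Int) (v : Nat) => PySem.Int.bxor b (PySem.Int.band (block >>> (v - 28)) 1)) 0)) 0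

-- B's while-loop, with fuel (one unit per iteration; n.toNat + 1 is always enough, because
-- at most the first iteration fails the 't >= first' filter)
def pvLoopB (cache_set : Int) (first : Int) (n : Int) : Nat → Int → List Int → List Int
  | 0, _, ts => ts
  | fuel + 1, block, ts =>
    if (ts.length : Int) < n then
      let t := PySem.Int.bor (block <<< (8:Nat)) (pvBitrev8 (PySem.Int.bxor cache_set (pvBlockHash block)))
      let ts := if first ≤ t then ts ++ [t] else ts
      pvLoopB cache_set first n fuel (block + 1) ts
    else ts

def get_eviction_set_alt (cache_set : Int) (base_address : Int) (indexed : Bool) (n : Int) : List Int :=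
  let low20 := PySem.Int.band base_address 0xfffff
  let first := (base_address >>> (20:Nat)) + 1
  let ts := pvLoopB cache_set first n (n.toNat + 1) (first >>> (8:Nat)) []
  if indexed then ts.map (fun t => PySem.Int.bxor (base_address >>> (20:Nat)) t)
  else ts.map (fun t => ((t : Int) <<< (20:Nat)) + low20)

-- ===== PRECONDITION & SPEC =====
-- A's hash takes every value in [0, 256), so A's while-loop never terminates when n ≥ 1 and
-- cache_set is outside [0, 256); Pre_ excludes exactly those diverging inputs.
def Pre_get_eviction_set (cache_set : Int) (base_address : Int) (indexed : Bool) (n : Int) : Prop :=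
  (0 ≤ cache_set ∧ cache_set < 256) ∨ n ≤ 0
instance (cache_set : Int) (base_address : Int) (indexed : Bool) (n : Int) : Decidable (Pre_get_eviction_set cache_set base_address indexed n) := by unfold Pre_get_eviction_set; infer_instance
def pvWitness_get_eviction_set : Int × Int × Bool × Int := (37, 1048576, true, 3)

def Spec_get_eviction_set (cache_set : Int) (base_address : Int) (indexed : Bool) (n : Int) (out : List Int) : Prop := out = get_eviction_set_alt cache_set base_address indexed n
instance (cache_set : Int) (base_address : Int) (indexed : Bool) (n : Int) (out : List Int) : Decidable (Spec_get_eviction_set cache_set base_address indexed n out) := by unfold Spec_get_eviction_set; infer_instance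

-- ===== CLAIM (what is proved, stated in full; the proofs are below) =====
def Claim_equal_get_eviction_set : Prop := ∀ (cache_set : Int) (base_address : Int) (indexed : Bool) (n : Int), Dom_get_eviction_set cache_set base_address indexed n → Pre_get_eviction_set cache_set base_address indexed n → Spec_get_eviction_set cache_set base_address indexed n (get_eviction_set cache_set base_address indexed n)

-- ===== LEMMAS AND PROOFS =====

-- ---------- generic bit-level toolkit ----------

theorem pv_band_two_pow (a : Int) (v : Nat) :
    PySem.Int.band a ((2 ^ v : Nat) : Int) = ((a.testBit v).toNat : Int) * 2 ^ v := by
  have hc : (((2 ^ v : Nat) : Int)).toNat = 2 ^ v := Int.toNat_natCast _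
  rcases a with m | m
  · rw [PySem.Int.band_of_nonneg (by exact Int.natCast_nonneg m) (by positivity)]
    have h0 : ((Int.ofNat m)).toNat = m := rfl
    rw [h0, hc, Nat.and_two_pow]
    have h1 : Int.testBit (Int.ofNat m) v = m.testBit v := rfl
    rw [h1]; push_cast; ring
  · unfold PySem.Int.band
    rw [if_neg (by omega), if_pos (by positivity)]
    have h2 : ((-(Int.negSucc m) - 1).toNat) = m := by simp [Int.negSucc_eq]
    rw [hc, h2, Nat.two_pow_and]
    have h3 : Int.testBit (Int.negSucc m) v = !m.testBit v := rfl
    rw [h3]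
    cases hmv : m.testBit v <;> simp

theorem pv_shiftRight_zero (a : Int) : a >>> (0:Nat) = a := by rcases a with m|m <;> rfl

theorem pv_one_shiftLeft (v : Nat) : (1:Int) <<< v = ((2 ^ v : Nat) : Int) := by
  show Int.ofNat (1 <<< v) = _
  rw [Nat.one_shiftLeft]; rfl

theorem pv_natCast_shiftRight (m k : Nat) : ((m:Nat):Int) >>> k = ((m >>> k : Nat) : Int) := rfl

-- (a & (1 << v)) >> v  extracts bit v
theorem pv_bitv (a : Int) (v : Nat) :
    (PySem.Int.band a ((1:Int) <<< v)) >>> v = ((a.testBit v).toNat : Int) := by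
  rw [pv_one_shiftLeft, pv_band_two_pow]
  have h1 : (((a.testBit v).toNat : Int)) * 2 ^ v = (((a.testBit v).toNat * 2 ^ v : Nat) : Int) := by
    push_cast; ring
  rw [h1, pv_natCast_shiftRight, Nat.shiftRight_eq_div_pow,
    Nat.mul_div_cancel _ (Nat.two_pow_pos v)]

theorem pv_band_one (a : Int) : PySem.Int.band a 1 = ((a.testBit 0).toNat : Int) := by
  have h := pv_bitv a 0
  rw [pv_shiftRight_zero, show ((1:Int) <<< (0:Nat)) = 1 from rfl] at h
  exact h

theorem pv_tb_shiftRight (a : Int) (s k : Nat) : (a >>> s).testBit k = a.testBit (s + k) := by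
  rcases a with m | m
  · show (m >>> s).testBit k = m.testBit (s + k); exact Nat.testBit_shiftRight m
  · show (!(m >>> s).testBit k) = !(m.testBit (s + k))
    rw [Nat.testBit_shiftRight]

theorem pv_bxor_bits (x y : Bool) :
    PySem.Int.bxor ((x.toNat : Nat) : Int) ((y.toNat : Nat) : Int) = (((x ^^ y).toNat : Nat) : Int) := by
  cases x <;> cases y <;> decide

theorem pv_bxor_zero_left (a : Int) : PySem.Int.bxor 0 a = a := by
  rw [PySem.Int.bxor_comm, PySem.Int.bxor_zero]

-- Euclidean division of a negative number by a power of two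
theorem pv_negSucc_ediv_pow (m k : Nat) :
    (Int.negSucc m) / (((2 ^ k : Nat)) : Int) = Int.negSucc (m / 2 ^ k) := by
  have hpos : (0:Int) < ((2 ^ k : Nat) : Int) := by positivity
  have hm := Nat.div_add_mod m (2 ^ k)
  have hmlt := Nat.mod_lt m (y := 2 ^ k) (Nat.two_pow_pos k)
  have h := (Int.ediv_emod_unique (a := Int.negSucc m) (b := ((2 ^ k : Nat) : Int))
      (q := Int.negSucc (m / 2 ^ k)) (r := ((2 ^ k : Nat) : Int) - 1 - ((m % 2 ^ k : Nat) : Int)) hpos)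
  rw [(h.mpr _).1]
  constructor
  · rw [Int.negSucc_eq, Int.negSucc_eq]
    push_cast
    nlinarith [hm, hmlt]
  · constructor <;> [skip; skip] <;> push_cast <;> omega

-- testBit as arithmetic (the central bridge)
theorem pv_tb_iff (x : Int) (k : Nat) :
    x.testBit k = decide (x / ((2 ^ k : Nat) : Int) % 2 = 1) := by
  rcases x with m | m
  · have h1 : Int.testBit (Int.ofNat m) k = m.testBit k := rfl
    rw [h1, Nat.testBit_eq_decide_div_mod_eq]
    have : ((Int.ofNat m)) / ((2 ^ k : Nat) : Int) % 2 = (((m / 2 ^ k % 2 : Nat)) : Int) := by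
      push_cast [Int.natCast_div]; rfl
    rw [this]
    have h4 : m / 2 ^ k % 2 = 0 ∨ m / 2 ^ k % 2 = 1 := by omega
    rcases h4 with h | h <;> rw [h] <;> simp
  · have h1 : Int.testBit (Int.negSucc m) k = !(m.testBit k) := rfl
    rw [h1, pv_negSucc_ediv_pow, Nat.testBit_eq_decide_div_mod_eq]
    have h2 : Int.negSucc (m / 2 ^ k) % 2 = 1 - ((m / 2 ^ k % 2 : Nat) : Int) := by
      rw [Int.negSucc_eq]
      have := Nat.div_add_mod (m / 2 ^ k) 2
      have h3 : (m / 2^k % 2) < 2 := Nat.mod_lt _ (by norm_num)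
      push_cast
      omega
    rw [h2]
    have h4 : m / 2 ^ k % 2 = 0 ∨ m / 2 ^ k % 2 = 1 := by omega
    rcases h4 with h | h <;> rw [h] <;> simp

-- extensionality
theorem pv_eq_of_tb {a b : Int} (h : ∀ k, a.testBit k = b.testBit k) : a = b := by
  rcases a with m | m <;> rcases b with n | n
  · have : m = n := Nat.eq_of_testBit_eq (fun i => h i)
    rw [this]
  · exfalso
    have hk : m < 2 ^ (m + n + 1) := lt_of_lt_of_le Nat.lt_two_pow_self
      (Nat.pow_le_pow_right (by norm_num) (by omega))
    have hn : n < 2 ^ (m + n + 1) := lt_of_lt_of_le Nat.lt_two_pow_self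
      (Nat.pow_le_pow_right (by norm_num) (by omega))
    have := h (m + n + 1)
    rw [show Int.testBit (Int.ofNat m) (m+n+1) = m.testBit (m+n+1) from rfl,
        show Int.testBit (Int.negSucc n) (m+n+1) = !(n.testBit (m+n+1)) from rfl,
        Nat.testBit_eq_false_of_lt hk, Nat.testBit_eq_false_of_lt hn] at this
    simp at this
  · exfalso
    have hk : m < 2 ^ (m + n + 1) := lt_of_lt_of_le Nat.lt_two_pow_self
      (Nat.pow_le_pow_right (by norm_num) (by omega))
    have hn : n < 2 ^ (m + n + 1) := lt_of_lt_of_le Nat.lt_two_pow_self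
      (Nat.pow_le_pow_right (by norm_num) (by omega))
    have := h (m + n + 1)
    rw [show Int.testBit (Int.negSucc m) (m+n+1) = !(m.testBit (m+n+1)) from rfl,
        show Int.testBit (Int.ofNat n) (m+n+1) = n.testBit (m+n+1) from rfl,
        Nat.testBit_eq_false_of_lt hk, Nat.testBit_eq_false_of_lt hn] at this
    simp at this
  · have : m = n := Nat.eq_of_testBit_eq (fun i => by
      have := h i
      rw [show Int.testBit (Int.negSucc m) i = !(m.testBit i) from rfl,
          show Int.testBit (Int.negSucc n) i = !(n.testBit i) from rfl] at this
      exact Bool.not_inj this)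
    rw [this]

-- bytes: equality from the low 8 bits
theorem pv_byte_ext {x y : Int} (hx0 : 0 ≤ x) (hx : x < 256) (hy0 : 0 ≤ y) (hy : y < 256)
    (h : ∀ j, j < 8 → x.testBit j = y.testBit j) : x = y := by
  apply pv_eq_of_tb
  intro k
  by_cases hk : k < 8
  · exact h k hk
  · lift x to Nat using hx0 with xm
    lift y to Nat using hy0 with ym
    have h256 : (256:Nat) ≤ 2 ^ k := by
      have := Nat.pow_le_pow_right (show 1 ≤ 2 by norm_num) (show 8 ≤ k by omega)
      simpa using this
    have hxm : xm < 2 ^ k := lt_of_lt_of_le (by exact_mod_cast hx) h256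
    have hym : ym < 2 ^ k := lt_of_lt_of_le (by exact_mod_cast hy) h256
    rw [show Int.testBit ((xm:Nat):Int) k = xm.testBit k from rfl,
        show Int.testBit ((ym:Nat):Int) k = ym.testBit k from rfl,
        Nat.testBit_eq_false_of_lt hxm, Nat.testBit_eq_false_of_lt hym]

-- ---------- byte arithmetic on Nat ----------

theorem pv_natbit_mul256_add (m l j : Nat) (hl : l < 256) :
    (256 * m + l).testBit j = if j < 8 then l.testBit j else m.testBit (j - 8) := by
  by_cases hj : j < 8
  · rw [if_pos hj, Nat.testBit_eq_decide_div_mod_eq, Nat.testBit_eq_decide_div_mod_eq]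
    have hsplit : 256 * m + l = l + (2 ^ (8 - j) * m) * 2 ^ j := by
      have hp : (2:Nat) ^ (8 - j) * 2 ^ j = 256 := by
        rw [← pow_add, show 8 - j + j = 8 by omega]; rfl
      calc 256 * m + l = l + (2 ^ (8 - j) * 2 ^ j) * m := by rw [hp]; ring
        _ = l + (2 ^ (8 - j) * m) * 2 ^ j := by ring
    rw [hsplit, Nat.add_mul_div_right _ _ (Nat.two_pow_pos j)]
    have heven : 2 ^ (8 - j) * m = 2 * (2 ^ (8 - j - 1) * m) := by
      rw [← mul_assoc, ← pow_succ']
      congr 2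
      omega
    rw [heven, decide_eq_decide]
    generalize 2 ^ (8 - j - 1) * m = q
    omega
  · rw [if_neg hj, Nat.testBit_eq_decide_div_mod_eq, Nat.testBit_eq_decide_div_mod_eq]
    have h2j : (2:Nat) ^ j = 256 * 2 ^ (j - 8) := by
      rw [show (256:Nat) = 2 ^ 8 from rfl, ← pow_add]
      congr 1
      omega
    rw [h2j, ← Nat.div_div_eq_div_mul]
    have : (256 * m + l) / 256 = m := by omega
    rw [this]

theorem pv_nat_or_256 (m l : Nat) (hl : l < 256) : 256 * m ||| l = 256 * m + l := by
  apply Nat.eq_of_testBit_eq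
  intro j
  rw [Nat.testBit_lor, pv_natbit_mul256_add m l j hl]
  have hm := pv_natbit_mul256_add m 0 j (by norm_num)
  rw [Nat.add_zero] at hm
  rw [hm]
  by_cases hj : j < 8
  · rw [if_pos hj, if_pos hj, Nat.zero_testBit, Bool.false_or]
  · rw [if_neg hj, if_neg hj]
    have : l.testBit j = false := Nat.testBit_eq_false_of_lt (lt_of_lt_of_le hl (by
      have := Nat.pow_le_pow_right (show 1 ≤ 2 by norm_num) (show 8 ≤ j by omega)
      simpa using this))
    rw [this, Bool.or_false]

theorem pv_nat_and_low (m l : Nat) (hl : l < 256) : (256 * m + 255) &&& l = l := by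
  apply Nat.eq_of_testBit_eq
  intro j
  rw [Nat.testBit_and, pv_natbit_mul256_add m 255 j (by norm_num)]
  by_cases hj : j < 8
  · rw [if_pos hj, show (255:Nat) = 2 ^ 8 - 1 from rfl, Nat.testBit_two_pow_sub_one,
      decide_eq_true hj, Bool.true_and]
  · rw [if_neg hj]
    have : l.testBit j = false := Nat.testBit_eq_false_of_lt (lt_of_lt_of_le hl (by
      have := Nat.pow_le_pow_right (show 1 ≤ 2 by norm_num) (show 8 ≤ j by omega)
      simpa using this))
    rw [this, Bool.and_false]

-- ---------- the (block << 8) | low  recombination ----------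

theorem pv_bor_shift8 (h : Int) (l : Nat) (hl : l < 256) :
    PySem.Int.bor (h <<< (8:Nat)) ((l : Nat) : Int) = 256 * h + l := by
  rcases h with m | m
  · show PySem.Int.bor (Int.ofNat (m <<< 8)) _ = _
    rw [PySem.Int.bor_of_nonneg (by exact Int.natCast_nonneg _) (by exact Int.natCast_nonneg _)]
    have h1 : ((Int.ofNat (m <<< 8))).toNat = 256 * m := by
      show m <<< 8 = 256 * m
      rw [Nat.shiftLeft_eq]; ring
    have h2 : (((l:Nat):Int)).toNat = l := Int.toNat_natCast _
    rw [h1, h2, pv_nat_or_256 m l hl]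
    have : (Int.ofNat m) = (m : Int) := rfl
    rw [this]
    push_cast
    ring
  · show PySem.Int.bor (Int.negSucc ((m + 1) <<< 8 - 1)) _ = _
    unfold PySem.Int.bor
    rw [if_neg (by omega), if_pos (by exact Int.natCast_nonneg _)]
    have h1 : (-(Int.negSucc ((m + 1) <<< 8 - 1)) - 1).toNat = 256 * m + 255 := by
      rw [Int.negSucc_eq]
      have : (m + 1) <<< 8 = 256 * m + 256 := by rw [Nat.shiftLeft_eq]; ring
      rw [this]
      push_cast
      omega
    have h2 : (((l:Nat):Int)).toNat = l := Int.toNat_natCast _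
    rw [h1, h2, pv_nat_and_low m l hl, Int.negSucc_eq]
    push_cast
    omega

-- ---------- xor bridge and shifts ----------


-- ---------- xor bridge and shifts ----------

theorem pv_bxor_eq_xor (a b : Int) : PySem.Int.bxor a b = Int.xor a b := by
  rcases a with m | m <;> rcases b with n | n
  · show PySem.Int.bxor ((m:Nat):Int) ((n:Nat):Int) = ((m ^^^ n : Nat) : Int)
    unfold PySem.Int.bxor
    rw [if_pos (Int.natCast_nonneg m), if_pos (Int.natCast_nonneg n)]
    rw [Int.toNat_natCast, Int.toNat_natCast]
  · show _ = Int.negSucc (m ^^^ n)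
    unfold PySem.Int.bxor
    rw [if_pos (by exact Int.natCast_nonneg m), if_neg (by omega)]
    have h1 : (-(Int.negSucc n) - 1).toNat = n := by simp [Int.negSucc_eq]
    have h2 : ((Int.ofNat m)).toNat = m := rfl
    rw [h1, h2, Int.negSucc_eq]
    push_cast
    ring
  · show _ = Int.negSucc (m ^^^ n)
    unfold PySem.Int.bxor
    rw [if_neg (by omega), if_pos (by exact Int.natCast_nonneg n)]
    have h1 : (-(Int.negSucc m) - 1).toNat = m := by simp [Int.negSucc_eq]
    have h2 : ((Int.ofNat n)).toNat = n := rfl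
    rw [h1, h2, Int.negSucc_eq]
    push_cast
    ring
  · show _ = ((m ^^^ n : Nat) : Int)
    unfold PySem.Int.bxor
    rw [if_neg (by omega), if_neg (by omega)]
    have h1 : (-(Int.negSucc m) - 1).toNat = m := by simp [Int.negSucc_eq]
    have h2 : (-(Int.negSucc n) - 1).toNat = n := by simp [Int.negSucc_eq]
    rw [h1, h2]

theorem pv_tb_bxor (a b : Int) (k : Nat) :
    (PySem.Int.bxor a b).testBit k = ((a.testBit k) ^^ (b.testBit k)) := by
  rw [pv_bxor_eq_xor, Int.testBit_lxor]

theorem pv_bxor_shiftRight (a b : Int) (s : Nat) :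
    (PySem.Int.bxor a b) >>> s = PySem.Int.bxor (a >>> s) (b >>> s) := by
  apply pv_eq_of_tb
  intro k
  rw [pv_tb_shiftRight, pv_tb_bxor, pv_tb_bxor, pv_tb_shiftRight, pv_tb_shiftRight]

-- ---------- the  (r << 1) | bit  accumulator ----------

theorem pv_nat_two_mul_or_one (m : Nat) : 2 * m ||| 1 = 2 * m + 1 := by
  apply Nat.eq_of_testBit_eq
  intro j
  rw [Nat.testBit_lor]
  cases j with
  | zero =>
    rw [Nat.testBit_zero, Nat.testBit_zero, Nat.testBit_zero]
    have h1 : (2 * m) % 2 = 0 := by omega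
    have h2 : (2 * m + 1) % 2 = 1 := by omega
    rw [h1, h2]
    simp
  | succ i =>
    rw [Nat.testBit_succ, Nat.testBit_succ, Nat.testBit_succ]
    have h1 : 2 * m / 2 = m := by omega
    have h2 : (2 * m + 1) / 2 = m := by omega
    have h3 : (1:Nat) / 2 = 0 := by norm_num
    rw [h1, h2, h3, Nat.zero_testBit, Bool.or_false]

theorem pv_bor_acc (m : Nat) (x : Bool) :
    PySem.Int.bor (((m : Nat) : Int) <<< (1:Nat)) ((x.toNat : Nat) : Int)
      = ((2 * m + x.toNat : Nat) : Int) := by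
  show PySem.Int.bor (Int.ofNat (m <<< 1)) _ = _
  rw [PySem.Int.bor_of_nonneg (by exact Int.natCast_nonneg _) (by exact Int.natCast_nonneg _)]
  have h1 : ((Int.ofNat (m <<< 1))).toNat = 2 * m := by
    show m <<< 1 = 2 * m
    rw [Nat.shiftLeft_eq]; ring
  have h2 : (((x.toNat : Nat) : Int)).toNat = x.toNat := Int.toNat_natCast _
  rw [h1, h2]
  cases x
  · norm_num
  · rw [show (true).toNat = 1 from rfl, pv_nat_two_mul_or_one]

-- ---------- testBit through the arithmetic decomposition ----------

theorem pv_tb_iff' (x : Int) (k : Nat) :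
    x.testBit k = decide (x / (2:Int) ^ k % 2 = 1) := by
  have h : (((2:Nat) ^ k : Nat) : Int) = (2:Int) ^ k := by push_cast; ring
  rw [pv_tb_iff, h]

theorem pv_tb_mul_pow_add (t w : Int) (s v : Nat) (hw0 : 0 ≤ w) (hw : w < 2 ^ s) (hv : s ≤ v) :
    ((2:Int) ^ s * t + w).testBit v = t.testBit (v - s) := by
  rw [pv_tb_iff', pv_tb_iff']
  have hsplit : ((2:Int) ^ s * t + w) / 2 ^ v = t / 2 ^ (v - s) := by
    have hpow : ((2:Int)) ^ v = 2 ^ s * 2 ^ (v - s) := by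
      rw [← pow_add]
      congr 1
      omega
    rw [hpow, ← Int.ediv_ediv_eq_ediv_mul (by positivity)]
    have h1 : ((2:Int) ^ s * t + w) / 2 ^ s = t := by
      rw [add_comm, Int.add_mul_ediv_left w t (by positivity : (0:Int) < 2 ^ s).ne',
        Int.ediv_eq_zero_of_lt hw0 hw, zero_add]
    rw [h1]
  rw [hsplit]

theorem pv_tb_low (x : Int) (s j : Nat) (hj : j < s) :
    (x % (2:Int) ^ s).testBit j = x.testBit j := by
  rw [pv_tb_iff', pv_tb_iff', decide_eq_decide]
  have hq := Int.emod_nonneg x (by positivity : ((2:Int) ^ s) ≠ 0)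
  have hlt := Int.emod_lt_of_pos x (by positivity : (0:Int) < 2 ^ s)
  have hx : (2:Int) ^ s * (x / 2 ^ s) + x % 2 ^ s = x := Int.ediv_add_emod x _
  have hpow : ((2:Int)) ^ s = 2 ^ j * 2 ^ (s - j) := by
    rw [← pow_add]; congr 1; omega
  have hrw : x = x % (2:Int) ^ s + (2:Int) ^ j * (2 ^ (s - j) * (x / 2 ^ s)) := by
    rw [← mul_assoc, ← hpow]
    omega
  have hdiv : x / (2:Int) ^ j = x % (2:Int) ^ s / 2 ^ j + 2 ^ (s - j) * (x / 2 ^ s) := by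
    conv_lhs => rw [hrw]
    rw [Int.add_mul_ediv_left _ _ (by positivity : (0:Int) < 2 ^ j).ne']
  rw [hdiv]
  have heven : (2:Int) ^ (s - j) * (x / 2 ^ s) = 2 * (2 ^ (s - j - 1) * (x / 2 ^ s)) := by
    rw [← mul_assoc, ← pow_succ']
    congr 2
    omega
  rw [heven]
  generalize (2:Int) ^ (s - j - 1) * (x / 2 ^ s) = q
  omega

def pvBN (b0 b1 b2 b3 b4 b5 b6 b7 : Bool) : Nat :=
  b0.toNat * 128 + b1.toNat * 64 + b2.toNat * 32 + b3.toNat * 16 +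
  b4.toNat * 8 + b5.toNat * 4 + b6.toNat * 2 + b7.toNat

set_option maxHeartbeats 1000000 in
theorem pv_gva_eq (a : Int) : get_virtual_address a =
    ((pvBN (((a.testBit 44 ^^ a.testBit 36) ^^ a.testBit 28) ^^ a.testBit 20)
          (((a.testBit 45 ^^ a.testBit 37) ^^ a.testBit 29) ^^ a.testBit 21)
          (((a.testBit 46 ^^ a.testBit 38) ^^ a.testBit 30) ^^ a.testBit 22)
          ((a.testBit 39 ^^ a.testBit 31) ^^ a.testBit 23)
          ((a.testBit 40 ^^ a.testBit 32) ^^ a.testBit 24)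
          ((a.testBit 41 ^^ a.testBit 33) ^^ a.testBit 25)
          ((a.testBit 42 ^^ a.testBit 34) ^^ a.testBit 26)
          ((a.testBit 43 ^^ a.testBit 35) ^^ a.testBit 27) : Nat) : Int) := by
  unfold get_virtual_address pvXored
  norm_num [PySem.List.enumerate, PySem.List.pySetD, PySem.List.pySet?,
    PySem.List.pyGetD, PySem.List.pyGet?, PySem.List.pyIdx?, List.range_succ,
    List.set, show Int.toNat 2 = 2 from rfl, show Int.toNat 3 = 3 from rfl,
    show Int.toNat 4 = 4 from rfl, show Int.toNat 5 = 5 from rfl,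
    show Int.toNat 6 = 6 from rfl, show Int.toNat 7 = 7 from rfl]
  simp only [pv_bitv]
  simp only [pv_bxor_zero_left]
  simp only [pv_bxor_bits]
  unfold pvBN
  push_cast [Bool.xor_assoc]
  ring

theorem pv_bor_acc0 (x : Bool) :
    PySem.Int.bor ((0:Int) <<< (1:Nat)) ((x.toNat : Nat) : Int) = ((x.toNat : Nat) : Int) := by
  cases x <;> decide

set_option maxHeartbeats 1000000 in
theorem pv_blockhash_eq (h : Int) : pvBlockHash h =
    ((pvBN ((h.testBit 16 ^^ h.testBit 8) ^^ h.testBit 0)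
          ((h.testBit 17 ^^ h.testBit 9) ^^ h.testBit 1)
          ((h.testBit 18 ^^ h.testBit 10) ^^ h.testBit 2)
          (h.testBit 11 ^^ h.testBit 3)
          (h.testBit 12 ^^ h.testBit 4)
          (h.testBit 13 ^^ h.testBit 5)
          (h.testBit 14 ^^ h.testBit 6)
          (h.testBit 15 ^^ h.testBit 7) : Nat) : Int) := by
  unfold pvBlockHash pvHigh
  simp only [List.foldl, Nat.reduceSub]
  simp only [pv_band_one, pv_tb_shiftRight, Nat.add_zero]
  simp only [pv_bxor_zero_left, pv_bxor_bits]
  simp only [pv_bor_acc0, pv_bor_acc]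
  unfold pvBN
  push_cast [Bool.xor_assoc]
  ring

set_option maxHeartbeats 1000000 in
theorem pv_bitrev8_eq (x : Int) : pvBitrev8 x =
    ((pvBN (x.testBit 0) (x.testBit 1) (x.testBit 2) (x.testBit 3)
          (x.testBit 4) (x.testBit 5) (x.testBit 6) (x.testBit 7) : Nat) : Int) := by
  unfold pvBitrev8
  simp only [List.range_succ, List.range_zero, List.nil_append, List.cons_append, List.foldl]
  simp only [pv_band_one, pv_tb_shiftRight, Nat.add_zero]
  simp only [pv_bor_acc0, pv_bor_acc]
  unfold pvBN
  push_cast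
  ring

-- ---------- byte helpers ----------

theorem pv_tb_natCast (m k : Nat) : ((m:Nat):Int).testBit k = m.testBit k := rfl

theorem pvBN_lt : ∀ b0 b1 b2 b3 b4 b5 b6 b7 : Bool, pvBN b0 b1 b2 b3 b4 b5 b6 b7 < 256 := by decide
theorem pvBN_tb0 : ∀ b0 b1 b2 b3 b4 b5 b6 b7 : Bool, (pvBN b0 b1 b2 b3 b4 b5 b6 b7).testBit 0 = b7 := by decide
theorem pvBN_tb1 : ∀ b0 b1 b2 b3 b4 b5 b6 b7 : Bool, (pvBN b0 b1 b2 b3 b4 b5 b6 b7).testBit 1 = b6 := by decide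
theorem pvBN_tb2 : ∀ b0 b1 b2 b3 b4 b5 b6 b7 : Bool, (pvBN b0 b1 b2 b3 b4 b5 b6 b7).testBit 2 = b5 := by decide
theorem pvBN_tb3 : ∀ b0 b1 b2 b3 b4 b5 b6 b7 : Bool, (pvBN b0 b1 b2 b3 b4 b5 b6 b7).testBit 3 = b4 := by decide
theorem pvBN_tb4 : ∀ b0 b1 b2 b3 b4 b5 b6 b7 : Bool, (pvBN b0 b1 b2 b3 b4 b5 b6 b7).testBit 4 = b3 := by decide
theorem pvBN_tb5 : ∀ b0 b1 b2 b3 b4 b5 b6 b7 : Bool, (pvBN b0 b1 b2 b3 b4 b5 b6 b7).testBit 5 = b2 := by decide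
theorem pvBN_tb6 : ∀ b0 b1 b2 b3 b4 b5 b6 b7 : Bool, (pvBN b0 b1 b2 b3 b4 b5 b6 b7).testBit 6 = b1 := by decide
theorem pvBN_tb7 : ∀ b0 b1 b2 b3 b4 b5 b6 b7 : Bool, (pvBN b0 b1 b2 b3 b4 b5 b6 b7).testBit 7 = b0 := by decide

theorem pv_byteN_eq_iff (p q : Nat) (hp : p < 256) (hq : q < 256) :
    p = q ↔ (∀ j, j < 8 → p.testBit j = q.testBit j) := by
  constructor
  · intro h j _
    rw [h]
  · intro h
    apply Nat.eq_of_testBit_eq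
    intro j
    by_cases hj : j < 8
    · exact h j hj
    · have h256 : (256:Nat) ≤ 2 ^ j := by
        have := Nat.pow_le_pow_right (show 1 ≤ 2 by norm_num) (show 8 ≤ j by omega)
        simpa using this
      rw [Nat.testBit_eq_false_of_lt (by omega), Nat.testBit_eq_false_of_lt (by omega)]

theorem pv_bool_shuffle : ∀ g t c : Bool, ((g ^^ t) = c) ↔ (t = (c ^^ g)) := by decide

theorem pv_tb_div256 (t : Int) (k : Nat) : (t / 256).testBit k = t.testBit (8 + k) := by
  have h : t / 256 = t >>> (8:Nat) := by
    rw [Int.shiftRight_eq_div_pow]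
    norm_num
  rw [h, pv_tb_shiftRight]

-- the B-side candidate of a block
def pvTB (c h : Int) : Int :=
  PySem.Int.bor (h <<< (8:Nat)) (pvBitrev8 (PySem.Int.bxor c (pvBlockHash h)))

theorem pv_tb_emod256 (t : Int) (j : Nat) (hj : j < 8) :
    (t % 256).testBit j = t.testBit j := by
  have h : (256:Int) = (2:Int) ^ 8 := by norm_num
  rw [h, pv_tb_low t 8 j hj]

theorem pv_int_byte_eq_iff (x y : Int) (hx0 : 0 ≤ x) (hx : x < 256) (hy0 : 0 ≤ y) (hy : y < 256) :
    x = y ↔ (∀ j, j < 8 → x.testBit j = y.testBit j) := by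
  constructor
  · intro h j _
    rw [h]
  · intro h
    exact pv_byte_ext hx0 hx hy0 hy h

theorem pv_split_iff (t : Int) (L : Nat) (hL : L < 256) :
    (t = 256 * (t / 256) + (L : Int)) ↔ (∀ j, j < 8 → t.testBit j = L.testBit j) := by
  have hsplit := Int.ediv_add_emod t 256
  have hr0 := Int.emod_nonneg t (show (256:Int) ≠ 0 by norm_num)
  have hrlt := Int.emod_lt_of_pos t (show (0:Int) < 256 by norm_num)
  constructor
  · intro h j hj
    have hmod : t % 256 = (L : Int) := by omega
    rw [← pv_tb_emod256 t j hj, hmod, pv_tb_natCast]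
  · intro h
    have hmod : t % 256 = (L : Int) := by
      rw [pv_int_byte_eq_iff _ _ hr0 hrlt (by positivity) (by exact_mod_cast hL)]
      intro j hj
      rw [pv_tb_emod256 t j hj, pv_tb_natCast]
      exact h j hj
    omega

set_option maxHeartbeats 2000000 in
theorem pv_key (c t w : Int) (hc0 : 0 ≤ c) (hc : c < 256) (hw0 : 0 ≤ w) (hw : w < 2 ^ 20) :
    (get_virtual_address ((2:Int) ^ 20 * t + w) = c) ↔ t = pvTB c (t / 256) := by
  have htb : ∀ v : Nat, 20 ≤ v → ((2:Int) ^ 20 * t + w).testBit v = t.testBit (v - 20) :=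
    fun v hv => pv_tb_mul_pow_add t w 20 v hw0 hw hv
  rw [pv_gva_eq]
  rw [htb 44 (by norm_num), htb 36 (by norm_num), htb 28 (by norm_num), htb 20 (by norm_num),
      htb 45 (by norm_num), htb 37 (by norm_num), htb 29 (by norm_num), htb 21 (by norm_num),
      htb 46 (by norm_num), htb 38 (by norm_num), htb 30 (by norm_num), htb 22 (by norm_num),
      htb 39 (by norm_num), htb 31 (by norm_num), htb 23 (by norm_num),
      htb 40 (by norm_num), htb 32 (by norm_num), htb 24 (by norm_num),
      htb 41 (by norm_num), htb 33 (by norm_num), htb 25 (by norm_num),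
      htb 42 (by norm_num), htb 34 (by norm_num), htb 26 (by norm_num),
      htb 43 (by norm_num), htb 35 (by norm_num), htb 27 (by norm_num)]
  simp only [Nat.reduceSub]
  -- normalise the B-side candidate
  unfold pvTB
  rw [pv_blockhash_eq]
  simp only [pv_tb_div256, Nat.reduceAdd]
  rw [show c = ((c.toNat : Nat) : Int) from (Int.toNat_of_nonneg hc0).symm]
  rw [PySem.Int.bxor_natCast]
  rw [pv_bitrev8_eq]
  simp only [pv_tb_natCast, Nat.testBit_xor]
  simp only [pvBN_tb0, pvBN_tb1, pvBN_tb2, pvBN_tb3, pvBN_tb4, pvBN_tb5, pvBN_tb6, pvBN_tb7]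
  rw [pv_bor_shift8 _ _ (pvBN_lt _ _ _ _ _ _ _ _)]
  have hctoNat : (c.toNat : Nat) < 256 := by omega
  -- LHS as bitwise equations
  rw [Int.natCast_inj (m := pvBN _ _ _ _ _ _ _ _) (n := c.toNat)]
  rw [pv_byteN_eq_iff _ _ (pvBN_lt _ _ _ _ _ _ _ _) hctoNat]
  -- RHS as bitwise equations
  rw [pv_split_iff t _ (pvBN_lt _ _ _ _ _ _ _ _)]
  -- both sides are now 8 bit equations; transfer one into the other
  constructor
  · intro H j hj
    interval_cases j
    · have h := H 7 (by norm_num)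
      rw [pvBN_tb7] at h
      rw [pvBN_tb0]
      exact (pv_bool_shuffle _ _ _).mp h
    · have h := H 6 (by norm_num)
      rw [pvBN_tb6] at h
      rw [pvBN_tb1]
      exact (pv_bool_shuffle _ _ _).mp h
    · have h := H 5 (by norm_num)
      rw [pvBN_tb5] at h
      rw [pvBN_tb2]
      exact (pv_bool_shuffle _ _ _).mp h
    · have h := H 4 (by norm_num)
      rw [pvBN_tb4] at h
      rw [pvBN_tb3]
      exact (pv_bool_shuffle _ _ _).mp h
    · have h := H 3 (by norm_num)
      rw [pvBN_tb3] at h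
      rw [pvBN_tb4]
      exact (pv_bool_shuffle _ _ _).mp h
    · have h := H 2 (by norm_num)
      rw [pvBN_tb2] at h
      rw [pvBN_tb5]
      exact (pv_bool_shuffle _ _ _).mp h
    · have h := H 1 (by norm_num)
      rw [pvBN_tb1] at h
      rw [pvBN_tb6]
      exact (pv_bool_shuffle _ _ _).mp h
    · have h := H 0 (by norm_num)
      rw [pvBN_tb0] at h
      rw [pvBN_tb7]
      exact (pv_bool_shuffle _ _ _).mp h
  · intro H j hj
    interval_cases j
    · have h := H 7 (by norm_num)
      rw [pvBN_tb7] at h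
      rw [pvBN_tb0]
      exact (pv_bool_shuffle _ _ _).mpr h
    · have h := H 6 (by norm_num)
      rw [pvBN_tb6] at h
      rw [pvBN_tb1]
      exact (pv_bool_shuffle _ _ _).mpr h
    · have h := H 5 (by norm_num)
      rw [pvBN_tb5] at h
      rw [pvBN_tb2]
      exact (pv_bool_shuffle _ _ _).mpr h
    · have h := H 4 (by norm_num)
      rw [pvBN_tb4] at h
      rw [pvBN_tb3]
      exact (pv_bool_shuffle _ _ _).mpr h
    · have h := H 3 (by norm_num)
      rw [pvBN_tb3] at h
      rw [pvBN_tb4]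
      exact (pv_bool_shuffle _ _ _).mpr h
    · have h := H 2 (by norm_num)
      rw [pvBN_tb2] at h
      rw [pvBN_tb5]
      exact (pv_bool_shuffle _ _ _).mpr h
    · have h := H 1 (by norm_num)
      rw [pvBN_tb1] at h
      rw [pvBN_tb6]
      exact (pv_bool_shuffle _ _ _).mpr h
    · have h := H 0 (by norm_num)
      rw [pvBN_tb0] at h
      rw [pvBN_tb7]
      exact (pv_bool_shuffle _ _ _).mpr h

-- ---------- loop lemmas ----------

theorem pv_loopA_stop (c n : Int) (f : Nat) (a : Int) (acc : List Int)
    (h : n ≤ (acc.length : Int)) : pvLoopA c n f a acc = acc := by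
  cases f with
  | zero => rfl
  | succ f =>
    unfold pvLoopA
    rw [if_neg (by omega)]

theorem pv_pvTB_bounds (c h : Int) : 256 * h ≤ pvTB c h ∧ pvTB c h < 256 * h + 256 := by
  unfold pvTB
  rw [pv_bitrev8_eq, pv_bor_shift8 _ _ (pvBN_lt _ _ _ _ _ _ _ _)]
  have hL := pvBN_lt ((PySem.Int.bxor c (pvBlockHash h)).testBit 0)
    ((PySem.Int.bxor c (pvBlockHash h)).testBit 1) ((PySem.Int.bxor c (pvBlockHash h)).testBit 2)
    ((PySem.Int.bxor c (pvBlockHash h)).testBit 3) ((PySem.Int.bxor c (pvBlockHash h)).testBit 4)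
    ((PySem.Int.bxor c (pvBlockHash h)).testBit 5) ((PySem.Int.bxor c (pvBlockHash h)).testBit 6)
    ((PySem.Int.bxor c (pvBlockHash h)).testBit 7)
  omega

theorem pv_loopA_succ (c n : Int) (f : Nat) (a : Int) (acc : List Int) :
    pvLoopA c n (f + 1) a acc
      = if (acc.length : Int) < n then
          pvLoopA c n f (a + 1048576)
            (if get_virtual_address (a + 1048576) = c then acc ++ [a + 1048576] else acc)
        else acc := rfl

theorem pv_loopB_succ (c first n : Int) (f : Nat) (block : Int) (ts : List Int) :
    pvLoopB c first n (f + 1) block ts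
      = if (ts.length : Int) < n then
          pvLoopB c first n f (block + 1)
            (if first ≤ pvTB c block then ts ++ [pvTB c block] else ts)
        else ts := rfl


set_option maxHeartbeats 1000000 in
set_option maxRecDepth 4096 in
theorem pv_blockA (c n w : Int) (hc0 : 0 ≤ c) (hc : c < 256) (hw0 : 0 ≤ w) (hw : w < 2 ^ 20) :
    ∀ (d f : Nat) (h t : Int) (acc : List Int),
    256 * h ≤ t + 1 → t + (d:Int) ≤ 256 * (h + 1) - 1 → (acc.length : Int) < n →
    pvLoopA c n (d + f) ((2:Int) ^ 20 * t + w) acc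
      = pvLoopA c n f ((2:Int) ^ 20 * (t + (d:Int)) + w)
          (acc ++ (if t < pvTB c h ∧ pvTB c h ≤ t + (d:Int)
                   then [(2:Int) ^ 20 * (pvTB c h) + w] else [])) := by
  intro d
  induction d with
  | zero =>
    intro f h t acc _ _ _
    rw [if_neg (by push_cast; omega)]
    push_cast
    rw [List.append_nil, add_zero, Nat.zero_add]
  | succ d IH =>
    intro f h t acc hlo hhi hlen
    have hbd := pv_pvTB_bounds c h
    rw [show d + 1 + f = (d + f) + 1 from by omega]
    rw [pv_loopA_succ, if_pos hlen]
    rw [show (2:Int) ^ 20 * t + w + 1048576 = (2:Int) ^ 20 * (t + 1) + w from by ring]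
    have hkey := pv_key c (t + 1) w hc0 hc hw0 hw
    have hdiv : (t + 1) / 256 = h := by
      have hb : t + 1 + (d:Int) ≤ 256 * (h + 1) - 1 := by push_cast at hhi; omega
      omega
    rw [hdiv] at hkey
    by_cases hm : get_virtual_address ((2:Int) ^ 20 * (t + 1) + w) = c
    · rw [if_pos hm]
      have htb1 : pvTB c h = t + 1 := (hkey.mp hm).symm
      rw [htb1]
      by_cases hlen' : ((acc ++ [(2:Int) ^ 20 * (t + 1) + w]).length : Int) < n
      · rw [IH f h (t + 1) (acc ++ [(2:Int) ^ 20 * (t + 1) + w]) (by omega)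
          (by push_cast; push_cast at hhi; omega) hlen']
        rw [htb1]
        rw [if_neg (by omega), if_pos (by constructor <;> push_cast <;> omega)]
        rw [List.append_nil,
          show ((2:Int) ^ 20 * (t + 1 + (d:Int)) + w) = ((2:Int) ^ 20 * (t + (((d:Nat) + 1 : Nat) : Int)) + w) from by push_cast; ring]
      · rw [pv_loopA_stop c n (d + f) _ _ (by omega)]
        rw [pv_loopA_stop c n f _ _
          (by rw [if_pos (by constructor <;> push_cast <;> omega)]
              simp only [List.length_append, List.length_cons, List.length_nil] at hlen' ⊢
              omega)]
        rw [if_pos (by constructor <;> push_cast <;> omega)]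
    · rw [if_neg hm]
      have htb1 : pvTB c h ≠ t + 1 := fun e => hm (hkey.mpr e.symm)
      rw [IH f h (t + 1) acc (by omega) (by push_cast; push_cast at hhi; omega) hlen]
      have hiff : (t + 1 < pvTB c h ∧ pvTB c h ≤ t + 1 + (d:Int))
          ↔ (t < pvTB c h ∧ pvTB c h ≤ t + (((d:Nat) + 1 : Nat) : Int)) := by
        constructor <;> intro hx <;> constructor <;> push_cast <;> push_cast at hx <;> omega
      simp only [hiff]
      rw [show ((2:Int) ^ 20 * (t + 1 + (d:Int)) + w) = ((2:Int) ^ 20 * (t + (((d:Nat) + 1 : Nat) : Int)) + w) from by push_cast; ring]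

set_option maxHeartbeats 1000000 in
theorem pv_main (c n w first : Int) (hc0 : 0 ≤ c) (hc : c < 256) (hw0 : 0 ≤ w) (hw : w < 2 ^ 20) :
    ∀ (m : Nat) (h t : Int) (ts : List Int) (fA : Nat),
    (h = first / 256 ∧ t + 1 = first ∨ first / 256 < h ∧ t + 1 = 256 * h) →
    (h = first / 256 → (ts.length : Int) + m ≥ n + 1) →
    (first / 256 < h → (ts.length : Int) + m ≥ n) →
    ((256 * (h + 1) - 1 - t).toNat + 256 * m ≤ fA) →
    pvLoopA c n fA ((2:Int) ^ 20 * t + w) (ts.map (fun u => (2:Int) ^ 20 * u + w))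
      = (pvLoopB c first n m h ts).map (fun u => (2:Int) ^ 20 * u + w) := by
  intro m
  induction m with
  | zero =>
    intro h t ts fA hinv hlen1 hlen2 hfuel
    have hstop : n ≤ (ts.length : Int) := by
      rcases hinv with ⟨h1, _⟩ | ⟨h1, _⟩
      · have := hlen1 h1; omega
      · have := hlen2 h1; omega
    show pvLoopA c n fA _ _ = (ts).map _
    rw [pv_loopA_stop c n fA _ _ (by rw [List.length_map]; omega)]
  | succ m IH =>
    intro h t ts fA hinv hlen1 hlen2 hfuel
    rw [pv_loopB_succ]
    by_cases hlenB : (ts.length : Int) < n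
    · rw [if_pos hlenB]
      have hbd := pv_pvTB_bounds c h
      have hfe : 256 * (first / 256) ≤ first ∧ first < 256 * (first / 256) + 256 := by omega
      -- the A side consumes one whole block
      set d : Nat := (256 * (h + 1) - 1 - t).toNat with hd
      have hdle : d + (fA - d) = fA := by omega
      rw [← hdle]
      rw [pv_blockA c n w hc0 hc hw0 hw d (fA - d) h t _
        (by rcases hinv with ⟨h1, h2⟩ | ⟨h1, h2⟩ <;> omega)
        (by omega)
        (by rw [List.length_map]; omega)]
      have hcond : (t < pvTB c h ∧ pvTB c h ≤ t + (d:Int)) ↔ (first ≤ pvTB c h) := by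
        rcases hinv with ⟨h1, h2⟩ | ⟨h1, h2⟩ <;>
          (constructor <;> intro hx <;> [skip; constructor] <;> omega)
      simp only [hcond]
      rw [show t + (d:Int) = 256 * (h + 1) - 1 from by
        rcases hinv with ⟨h1, h2⟩ | ⟨h1, h2⟩ <;> omega]
      have hmapts : ∀ (b : Prop) [Decidable b],
          (ts.map (fun u => (2:Int) ^ 20 * u + w)
            ++ (if b then [(2:Int) ^ 20 * (pvTB c h) + w] else []))
          = (if b then ts ++ [pvTB c h] else ts).map (fun u => (2:Int) ^ 20 * u + w) := by
        intro b _
        by_cases hb : b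
        · rw [if_pos hb, if_pos hb, List.map_append]
          rfl
        · rw [if_neg hb, if_neg hb, List.append_nil]
      rw [hmapts]
      -- recurse
      rcases hinv with ⟨h1, h2⟩ | ⟨h1, h2⟩
      · by_cases hfirst : first ≤ pvTB c h
        · rw [if_pos hfirst]
          rw [show (256 * (h + 1) - 1 : Int) = (256 * (h + 1) - 1) from rfl]
          exact IH (h + 1) (256 * (h + 1) - 1) (ts ++ [pvTB c h]) (fA - d)
            (Or.inr ⟨by omega, by ring⟩)
            (by intro hcon; omega)
            (by intro _; have := hlen1 h1; simp only [List.length_append, List.length_cons, List.length_nil]; push_cast; omega)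
            (by omega)
        · rw [if_neg hfirst]
          exact IH (h + 1) (256 * (h + 1) - 1) ts (fA - d)
            (Or.inr ⟨by omega, by ring⟩)
            (by intro hcon; omega)
            (by intro _; have := hlen1 h1; omega)
            (by omega)
      · have hfirst : first ≤ pvTB c h := by omega
        rw [if_pos hfirst]
        exact IH (h + 1) (256 * (h + 1) - 1) (ts ++ [pvTB c h]) (fA - d)
          (Or.inr ⟨by omega, by ring⟩)
          (by intro hcon; omega)
          (by intro _; have := hlen2 h1; simp only [List.length_append, List.length_cons, List.length_nil]; push_cast; omega)
          (by omega)
    · rw [if_neg hlenB]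
      rw [pv_loopA_stop c n fA _ _ (by rw [List.length_map]; omega)]

theorem pv_band_mask20 (b : Int) : PySem.Int.band b 1048575 = b % 1048576 := by
  rcases b with m | m
  · rw [PySem.Int.band_of_nonneg (by exact Int.natCast_nonneg m) (by norm_num)]
    have h1 : ((Int.ofNat m)).toNat = m := rfl
    have h2 : ((1048575 : Int)).toNat = 2 ^ 20 - 1 := rfl
    rw [h1, h2, Nat.and_two_pow_sub_one_eq_mod]
    rw [show Int.ofNat m = ((m:Nat):Int) from rfl]
    push_cast [Int.natCast_emod]
    norm_num
  · unfold PySem.Int.band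
    rw [if_neg (by omega), if_pos (by norm_num)]
    have h1 : (-(Int.negSucc m) - 1).toNat = m := by simp [Int.negSucc_eq]
    have h2 : ((1048575 : Int)).toNat = 2 ^ 20 - 1 := rfl
    rw [h1, h2, Nat.land_comm, Nat.and_two_pow_sub_one_eq_mod]
    have h3 : m % 2 ^ 20 < 2 ^ 20 := Nat.mod_lt _ (by norm_num)
    have h4 := Nat.div_add_mod m (2 ^ 20)
    rw [Int.negSucc_eq]
    push_cast
    omega

theorem pv_shift20 (b : Int) : b >>> (20:Nat) = b / 1048576 := by
  rw [Int.shiftRight_eq_div_pow]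
  norm_num

theorem pv_shift8 (b : Int) : b >>> (8:Nat) = b / 256 := by
  rw [Int.shiftRight_eq_div_pow]
  norm_num

theorem pv_shiftLeft20 (u : Int) : u <<< (20:Nat) = 1048576 * u := by
  rcases u with m | m
  · show Int.ofNat (m <<< 20) = _
    rw [Nat.shiftLeft_eq]
    rw [show Int.ofNat (m * 2 ^ 20) = ((m * 2 ^ 20 : Nat) : Int) from rfl,
      show Int.ofNat m = ((m : Nat) : Int) from rfl]
    push_cast
    ring
  · show Int.negSucc ((m + 1) <<< 20 - 1) = _
    rw [Nat.shiftLeft_eq, Int.negSucc_eq, Int.negSucc_eq]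
    have h1 : 1 ≤ (m + 1) * 2 ^ 20 := Nat.one_le_iff_ne_zero.mpr (by positivity)
    omega

theorem pv_addr_shift (u w : Int) (hw0 : 0 ≤ w) (hw : w < 2 ^ 20) :
    ((2:Int) ^ 20 * u + w) >>> (20:Nat) = u := by
  rw [Int.shiftRight_eq_div_pow]
  rw [show ((2 ^ 20 : Nat) : Int) = (2:Int) ^ 20 from by norm_num]
  rw [add_comm]
  rw [Int.add_mul_ediv_left w u (by positivity : (0:Int) < 2 ^ 20).ne']
  rw [Int.ediv_eq_zero_of_lt hw0 hw]
  exact zero_add u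

theorem pv_nle_loopA (c n : Int) (hn : n ≤ 0) (b : Int) :
    pvLoopA c n (256 * (n.toNat + 2)) b [] = [] := by
  rw [show n.toNat = 0 from by omega]
  rw [show 256 * (0 + 2) = 511 + 1 from by norm_num]
  rw [pv_loopA_succ, if_neg (by simp; omega)]

theorem pv_nle_loopB (c first n : Int) (hn : n ≤ 0) (b : Int) :
    pvLoopB c first n (n.toNat + 1) b [] = [] := by
  rw [show n.toNat = 0 from by omega]
  rw [show (0 + 1 : Nat) = 0 + 1 from rfl, pv_loopB_succ, if_neg (by simp; omega)]

set_option maxHeartbeats 1000000 in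
theorem pv_final (cache_set base_address : Int) (indexed : Bool) (n : Int)
    (hpre : (0 ≤ cache_set ∧ cache_set < 256) ∨ n ≤ 0) :
    get_eviction_set cache_set base_address indexed n
      = get_eviction_set_alt cache_set base_address indexed n := by
  unfold get_eviction_set get_eviction_set_alt
  dsimp only
  by_cases hn : n ≤ 0
  · rw [pv_nle_loopA _ _ hn, pv_nle_loopB _ _ _ hn]
    cases indexed <;> simp
  · have hc0 : 0 ≤ cache_set := by rcases hpre with ⟨h1, _⟩ | h1 <;> omega
    have hc : cache_set < 256 := by rcases hpre with ⟨_, h1⟩ | h1 <;> omega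
    set w : Int := PySem.Int.band base_address 1048575 with hwdef
    have hwval : w = base_address % 1048576 := pv_band_mask20 base_address
    have hw0 : 0 ≤ w := by rw [hwval]; omega
    have hw : w < 2 ^ 20 := by rw [hwval]; norm_num; omega
    set t0 : Int := base_address >>> (20:Nat) with ht0def
    have ht0 : t0 = base_address / 1048576 := pv_shift20 base_address
    have hbase : base_address = (2:Int) ^ 20 * t0 + w := by
      rw [ht0, hwval]
      have h := Int.ediv_add_emod base_address 1048576
      omega

    set first : Int := t0 + 1 with hfirstdef
    have hblock : first >>> (8:Nat) = first / 256 := pv_shift8 first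
    have hmain := pv_main cache_set n w first hc0 hc hw0 hw (n.toNat + 1)
      (first / 256) t0 [] (256 * (n.toNat + 2))
      (Or.inl ⟨rfl, rfl⟩)
      (by intro _; simp only [List.length_nil]; push_cast; omega)
      (by intro hcon; omega)
      (by have h1 : 256 * (first / 256) ≤ first := by omega
          have h2 : first < 256 * (first / 256) + 256 := by omega
          omega)
    rw [List.map_nil] at hmain
    rw [hblock]
    conv_lhs => rw [hbase]
    rw [hmain]
    cases indexed
    · simp only [Bool.false_eq_true, if_false]
      rw [show (fun u => (2:Int) ^ 20 * u + w) = (fun t => ((t : Int) <<< (20:Nat)) + w) from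
        funext fun u => by rw [pv_shiftLeft20]; ring]
    · simp only [if_true]
      rw [PySem.List.foldl_append_singleton_eq_map, List.nil_append, List.map_map]
      apply List.map_congr_left
      intro u _
      simp only [Function.comp_apply]
      rw [pv_bxor_shiftRight, pv_addr_shift u w hw0 hw, pv_addr_shift t0 w hw0 hw]


-- ===== VERDICT (by name: the statement is the Claim_ definition above) =====
theorem get_eviction_set_spec : Claim_equal_get_eviction_set := by
  intro cache_set base_address indexed n _ hpre
  show get_eviction_set cache_set base_address indexed n
    = get_eviction_set_alt cache_set base_address indexed n
  exact pv_final cache_set base_address indexed n hpre
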